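-- pv_equiv track=rewrite | github.com/tw-techops/aupro-knowledge-management | plotly/script/ai_maturity_fishbone_plotly_en.py | generate_capabilities_data
-- ===== SOURCE A (Python) =====
-- def generate_capabilities_data(data):
--     """Generate capabilities data in JSON format for JavaScript usage"""
--     capabilities_data = {}
--
--     levels = list(data['levels'].keys())
--     for level in levels:
--         level_data = data['levels'][level]
--         if 'capabilities' in level_data:
--             for capability_type, capabilities in level_data['capabilities'].items():
--                 if capability_type not in capabilities_data:
--                     capabilities_data[capability_type] = {}
--                 capabilities_data[capability_type][level] = capabilities
--
--     return capabilities_data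
-- ===== SOURCE B (Python) =====
-- def generate_capabilities_data(data):
--     """Generate capabilities data in JSON format for JavaScript usage"""
--     levels = data['levels']
--
--     # Phase 1: capability types in first-occurrence order across the levels.
--     order = []
--     seen = set()
--     for level_data in levels.values():
--         for capability_type in level_data.get('capabilities', {}):
--             if capability_type not in seen:
--                 seen.add(capability_type)
--                 order.append(capability_type)
--
--     # Phase 2: one column per capability type, scanning the levels in order.
--     return {
--         capability_type: {
--             level: level_data['capabilities'][capability_type]
--             for level, level_data in levels.items()
--             if 'capabilities' in level_data
--             and capability_type in level_data['capabilities']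
--         }
--         for capability_type in order
--     }
-- ===== Notes on version B (the rewrite author's own statement) =====
-- stated objective: alternative
-- what changed: B builds the result column-major: a first pass collects the capability types in first-occurrence order, then a per-type comprehension scans the levels to assemble each type's inner dict, instead of A's single row-major pass that mutates nested dicts in place.
-- outside the precondition, e.g. on generate_capabilities_data({}): A raises KeyError, B raises KeyError
import Mathlib
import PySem

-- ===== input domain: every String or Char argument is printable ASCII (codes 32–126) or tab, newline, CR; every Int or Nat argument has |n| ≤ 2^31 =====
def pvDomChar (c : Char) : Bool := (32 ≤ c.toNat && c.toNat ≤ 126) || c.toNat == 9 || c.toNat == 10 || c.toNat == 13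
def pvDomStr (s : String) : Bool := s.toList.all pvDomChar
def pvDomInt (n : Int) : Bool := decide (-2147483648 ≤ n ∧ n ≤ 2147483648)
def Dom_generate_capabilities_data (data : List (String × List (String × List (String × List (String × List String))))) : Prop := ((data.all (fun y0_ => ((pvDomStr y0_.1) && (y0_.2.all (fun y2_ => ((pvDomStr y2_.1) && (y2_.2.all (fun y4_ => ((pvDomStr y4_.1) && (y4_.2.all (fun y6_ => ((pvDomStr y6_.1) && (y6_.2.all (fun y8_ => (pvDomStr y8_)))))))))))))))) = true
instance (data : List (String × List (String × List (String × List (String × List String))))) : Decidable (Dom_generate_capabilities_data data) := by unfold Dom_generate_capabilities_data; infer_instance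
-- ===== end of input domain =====

-- B transposes the build: it first collects the capability types in first-occurrence order, then
-- assembles each type's level-dict by a per-type scan of the levels (column-major), instead of A's
-- row-major pass mutating nested dicts. Objective: alternative (same asymptotic cost, not faster).

-- ===== PORT A =====
def generate_capabilities_data (data : List (String × List (String × List (String × List (String × List String))))) : List (String × List (String × List String)) :=
  let levelsDict := PySem.Dict.mk ((PySem.Dict.mk data).getD "levels" [])
  let levels := levelsDict.keys
  let acc := levels.foldl (fun acc level =>
      let level_data := PySem.Dict.mk (levelsDict.getD level [])
      if level_data.contains "capabilities" then
        (PySem.Dict.mk (level_data.getD "capabilities" [])).items.foldl (fun acc q =>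
          let acc := if acc.contains q.1 then acc else acc.insert q.1 PySem.Dict.empty
          acc.modify q.1 PySem.Dict.empty (fun inner => inner.insert level q.2)) acc
      else acc)
    (PySem.Dict.empty : PySem.Dict String (PySem.Dict String (List String)))
  acc.items.map (fun r => (r.1, r.2.items))

-- ===== PORT B =====
def generate_capabilities_data_alt (data : List (String × List (String × List (String × List (String × List String))))) : List (String × List (String × List String)) :=
  let lvs := (PySem.Dict.mk data).getD "levels" []
  let order : PySem.Set String := lvs.foldl (fun seen p =>
      ((PySem.Dict.mk p.2).getD "capabilities" []).foldl (fun seen q => PySem.Set.add seen q.1) seen) []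
  order.map (fun t =>
    (t, lvs.filterMap (fun p =>
          let cd := PySem.Dict.mk ((PySem.Dict.mk p.2).getD "capabilities" [])
          if cd.contains t then some (p.1, cd.getD t []) else none)))

-- ===== PRECONDITION & SPEC =====
-- Pre_ requires the key 'levels' (A raises KeyError without it) and that the 'levels' association
-- list and each level's 'capabilities' association list have distinct keys: duplicate-key lists do
-- not represent any Python dict, so neither program's behaviour on them is Python's.
def Pre_generate_capabilities_data (data : List (String × List (String × List (String × List (String × List String))))) : Prop :=
  (PySem.Dict.mk data).contains "levels" = true ∧
  ((((PySem.Dict.mk data).getD "levels" []).map (·.1)).Nodup ∧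
    ∀ p ∈ (PySem.Dict.mk data).getD "levels" [],
      (((PySem.Dict.mk p.2).getD "capabilities" []).map (·.1)).Nodup)
instance (data : List (String × List (String × List (String × List (String × List String))))) : Decidable (Pre_generate_capabilities_data data) := by unfold Pre_generate_capabilities_data; infer_instance

def pvWitness_generate_capabilities_data : (List (String × List (String × List (String × List (String × List String))))) :=
  [("levels", [("Level 1", [("capabilities", [("people", ["a", "b"]), ("process", [])])]),
               ("Level 2", [("capabilities", [("people", ["c"])]), ("name", [])])])]

def Spec_generate_capabilities_data (data : List (String × List (String × List (String × List (String × List String))))) (out : List (String × List (String × List String))) : Prop := out = generate_capabilities_data_alt data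
instance (data : List (String × List (String × List (String × List (String × List String))))) (out : List (String × List (String × List String))) : Decidable (Spec_generate_capabilities_data data out) := by unfold Spec_generate_capabilities_data; infer_instance

-- ===== CLAIM (what is proved, stated in full; the proofs are below) =====
def Claim_equal_generate_capabilities_data : Prop := ∀ (data : List (String × List (String × List (String × List (String × List String))))), Dom_generate_capabilities_data data → Pre_generate_capabilities_data data → Spec_generate_capabilities_data data (generate_capabilities_data data)

-- ===== LEMMAS AND PROOFS =====

-- the 'capabilities' association list of one level entry (proof-side shorthand)
def pvCaps (p : String × List (String × List (String × List String))) : List (String × List String) :=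
  (PySem.Dict.mk p.2).getD "capabilities" []

-- the common normal form both ports are reduced to
def pvCanon (lvs : List (String × List (String × List (String × List String)))) : List (String × List (String × List String)) :=
  (PySem.Set.ofList (lvs.flatMap (fun p => (pvCaps p).map (·.1)))).map (fun t =>
    (t, (lvs.filter (fun p => (PySem.Dict.mk (pvCaps p)).contains t)).map
          (fun p => (p.1, (PySem.Dict.mk (pvCaps p)).getD t []))))

theorem pv_fold_keys_lookup {α : Type} (lvs : List (String × List (String × List (String × List String))))
    (h : (lvs.map (·.1)).Nodup)
    (g : α → String → List (String × List (String × List String)) → α) (init : α) :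
    (lvs.map (·.1)).foldl (fun acc level => g acc level ((PySem.Dict.mk lvs).getD level [])) init
      = lvs.foldl (fun acc p => g acc p.1 p.2) init := by
  induction lvs generalizing init with
  | nil => rfl
  | cons p rest ih =>
    obtain ⟨k, v⟩ := p
    simp only [List.map_cons, List.nodup_cons] at h
    simp only [List.map_cons, List.foldl_cons]
    have hhead : (PySem.Dict.mk ((k, v) :: rest)).getD k [] = v := by
      simp [PySem.Dict.getD_eq_get?_getD, PySem.Dict.get?_mk_cons]
    rw [hhead]
    rw [PySem.List.foldl_congr_mem _ _
        (fun acc level => g acc level ((PySem.Dict.mk rest).getD level [])) _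
        (by
          intro acc level hlevel
          have hne : (k == level) = false := by
            simp only [beq_eq_false_iff_ne]
            intro he; exact h.1 (he ▸ hlevel)
          simp [PySem.Dict.getD_eq_get?_getD, PySem.Dict.get?_mk_cons, hne])]
    exact ih h.2 _

theorem pv_step_collapse (acc : PySem.Dict String (PySem.Dict String (List String)))
    (t level : String) (cs : List String) :
    (if acc.contains t then acc else acc.insert t PySem.Dict.empty).modify t PySem.Dict.empty
        (fun inner => inner.insert level cs)
      = acc.insert t ((acc.getD t PySem.Dict.empty).insert level cs) := by
  by_cases h : acc.contains t
  · simp [h, PySem.Dict.modify]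
  · simp only [Bool.not_eq_true] at h
    simp [h, PySem.Dict.modify, PySem.Dict.insert_insert_self, PySem.Dict.getD_insert_self,
      PySem.Dict.getD_of_not_contains _ _ h]

theorem pv_getD_group (T : List (String × String × List String))
    (d : PySem.Dict String (PySem.Dict String (List String))) (t : String) :
    (T.foldl (fun acc x => acc.insert x.1 ((acc.getD x.1 PySem.Dict.empty).insert x.2.1 x.2.2)) d).getD t PySem.Dict.empty
      = (T.filter (fun x => x.1 == t)).foldl (fun inner x => inner.insert x.2.1 x.2.2)
          (d.getD t PySem.Dict.empty) := by
  induction T generalizing d with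
  | nil => rfl
  | cons x xs ih =>
    by_cases hx : x.1 = t
    · subst hx
      simp [ih, PySem.Dict.getD_insert_self]
    · simp [hx, ih, PySem.Dict.getD_insert_of_ne _ _ _ (Ne.symm hx)]

theorem pv_filter_caps (caps : List (String × List String)) (t : String)
    (h : (caps.map (·.1)).Nodup) :
    caps.filter (fun q => q.1 == t)
      = if (PySem.Dict.mk caps).contains t then [(t, (PySem.Dict.mk caps).getD t [])] else [] := by
  induction caps with
  | nil => simp [PySem.Dict.contains_mk]
  | cons q rest ih =>
    obtain ⟨k, v⟩ := q
    simp only [List.map_cons, List.nodup_cons] at h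
    by_cases hq : k = t
    · subst hq
      have hrest : rest.filter (fun r => r.1 == k) = [] := by
        rw [List.filter_eq_nil_iff]
        intro r hr
        simp only [beq_iff_eq]
        intro he
        exact h.1 (by rw [← he]; exact List.mem_map_of_mem hr)
      simp [hrest, PySem.Dict.contains_mk, PySem.Dict.getD_eq_get?_getD,
        PySem.Dict.get?_mk_cons]
    · have hb : (k == t) = false := by simp [hq]
      simp only [List.filter_cons, hb, Bool.false_eq_true, if_false, ih h.2,
        PySem.Dict.contains_mk, List.any_cons, Bool.false_or]
      by_cases hc : rest.any (fun p => p.1 == t) <;>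
        simp [hc, PySem.Dict.getD_eq_get?_getD, PySem.Dict.get?_mk_cons, hb]

-- T.filter at one type t, as a filter-then-map over the levels
theorem pv_T_filter (lvs : List (String × List (String × List (String × List String)))) (t : String)
    (hcaps : ∀ p ∈ lvs, ((pvCaps p).map (·.1)).Nodup) :
    (lvs.flatMap (fun p => (pvCaps p).map (fun q => (q.1, p.1, q.2)))).filter (fun x => x.1 == t)
      = (lvs.filter (fun p => (PySem.Dict.mk (pvCaps p)).contains t)).map
          (fun p => (t, p.1, (PySem.Dict.mk (pvCaps p)).getD t [])) := by
  induction lvs with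
  | nil => rfl
  | cons p rest ih =>
    have hrow : ((pvCaps p).map (fun q => (q.1, p.1, q.2))).filter (fun x => x.1 == t)
        = if (PySem.Dict.mk (pvCaps p)).contains t
          then [(t, p.1, (PySem.Dict.mk (pvCaps p)).getD t [])] else [] := by
      rw [List.filter_map]
      rw [show ((fun (x : String × String × List String) => x.1 == t) ∘ (fun q => (q.1, p.1, q.2)))
          = fun (q : String × List String) => q.1 == t from rfl]
      rw [pv_filter_caps _ t (hcaps p (by simp))]
      by_cases hc : (PySem.Dict.mk (pvCaps p)).contains t <;> simp [hc]
    rw [List.flatMap_cons, List.filter_append, hrow,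
      ih (fun q hq => hcaps q (List.mem_cons_of_mem _ hq)), List.filter_cons]
    by_cases hc : (PySem.Dict.mk (pvCaps p)).contains t <;> simp [hc]

theorem pv_A_eq (data : List (String × List (String × List (String × List (String × List String)))))
    (hnd : (((PySem.Dict.mk data).getD "levels" []).map (·.1)).Nodup)
    (hcaps : ∀ p ∈ (PySem.Dict.mk data).getD "levels" [], ((pvCaps p).map (·.1)).Nodup) :
    generate_capabilities_data data = pvCanon ((PySem.Dict.mk data).getD "levels" []) := by
  simp only [generate_capabilities_data]
  set lvs := (PySem.Dict.mk data).getD "levels" [] with hlvs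
  rw [PySem.Dict.keys_mk]
  rw [pv_fold_keys_lookup lvs hnd
      (fun acc level pd =>
        if (PySem.Dict.mk pd).contains "capabilities" then
          (PySem.Dict.mk ((PySem.Dict.mk pd).getD "capabilities" [])).items.foldl (fun acc q =>
            (if acc.contains q.1 then acc else acc.insert q.1 PySem.Dict.empty).modify q.1
              PySem.Dict.empty (fun inner => inner.insert level q.2)) acc
        else acc) PySem.Dict.empty]
  -- collapse the contains-guard and the insert-empty guard
  rw [PySem.List.foldl_congr_mem _ _
      (fun acc p => (pvCaps p).foldl (fun acc q =>
          acc.insert q.1 ((acc.getD q.1 PySem.Dict.empty).insert p.1 q.2)) acc) _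
      (by
        intro acc p _
        show (if (PySem.Dict.mk p.2).contains "capabilities" then _ else acc) = _
        cases hc : (PySem.Dict.mk p.2).contains "capabilities"
        · simp only [Bool.false_eq_true, if_false, pvCaps,
            PySem.Dict.getD_of_not_contains _ _ hc]
          rfl
        · simp only [if_true, pvCaps]
          exact PySem.List.foldl_congr_mem _ _ _ _ (by intro a q _; exact pv_step_collapse a q.1 p.1 q.2))]
  -- the nested fold is a fold over the flattened triples
  have hT : lvs.foldl (fun acc p => (pvCaps p).foldl (fun acc q =>
        acc.insert q.1 ((acc.getD q.1 PySem.Dict.empty).insert p.1 q.2)) acc)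
        (PySem.Dict.empty : PySem.Dict String (PySem.Dict String (List String)))
      = (lvs.flatMap (fun p => (pvCaps p).map (fun q => (q.1, p.1, q.2)))).foldl
          (fun acc x => acc.insert x.1 ((acc.getD x.1 PySem.Dict.empty).insert x.2.1 x.2.2))
          PySem.Dict.empty := by
    rw [List.foldl_flatMap]
    simp only [List.foldl_map]
  rw [hT]
  set T := lvs.flatMap (fun p => (pvCaps p).map (fun q => (q.1, p.1, q.2))) with hTdef
  set acc := T.foldl (fun acc x => acc.insert x.1 ((acc.getD x.1 PySem.Dict.empty).insert x.2.1 x.2.2))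
      PySem.Dict.empty with haccdef
  have hkn : acc.keys.Nodup := by
    rw [haccdef]
    exact PySem.Dict.nodup_keys_foldl_insert_key T (fun x => x.1)
      (fun d x => (d.getD x.1 PySem.Dict.empty).insert x.2.1 x.2.2) PySem.Dict.empty (by simp)
  have hkeys : acc.keys = PySem.Set.ofList (T.map (fun x => x.1)) := by
    rw [haccdef]
    rw [PySem.Dict.keys_foldl_insert_key T (fun x => x.1)
      (fun d x => (d.getD x.1 PySem.Dict.empty).insert x.2.1 x.2.2) PySem.Dict.empty]
    simp [PySem.Set.update_nil_left]
  rw [PySem.Dict.items_eq_map_keys acc hkn PySem.Dict.empty, hkeys]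
  rw [List.map_map]
  have hTmap : T.map (fun x => x.1) = lvs.flatMap (fun p => (pvCaps p).map (·.1)) := by
    rw [hTdef, List.map_flatMap]
    simp [List.map_map, Function.comp_def]
  rw [hTmap]
  rw [pvCanon]
  refine List.map_congr_left ?_
  intro t _
  simp only [Function.comp_apply]
  congr 1
  -- the value at t
  rw [haccdef, pv_getD_group]
  rw [show (PySem.Dict.empty : PySem.Dict String (PySem.Dict String (List String))).getD t PySem.Dict.empty
      = PySem.Dict.empty from rfl]
  rw [hTdef, pv_T_filter lvs t hcaps]
  rw [List.foldl_map]
  have := PySem.Dict.items_foldl_insert_fresh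
      (lvs.filter (fun p => (PySem.Dict.mk (pvCaps p)).contains t))
      (fun p => p.1) (fun p => (PySem.Dict.mk (pvCaps p)).getD t [])
      (PySem.Dict.empty : PySem.Dict String (List String))
      (by intro a _; rfl)
      (by
        exact hnd.sublist (List.Sublist.map _ List.filter_sublist))
  simpa using this

theorem pv_foldl_update {α β : Type} [BEq α] (l : List β) (k : β → List α) (s : PySem.Set α) :
    l.foldl (fun s b => PySem.Set.update s (k b)) s = PySem.Set.update s (l.flatMap k) := by
  induction l generalizing s with
  | nil => simp [PySem.Set.update_nil]
  | cons x xs ih => simp [PySem.Set.update_append, ih]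

theorem pv_B_inner (lvs : List (String × List (String × List (String × List String)))) (t : String) :
    lvs.filterMap (fun p =>
        if (PySem.Dict.mk ((PySem.Dict.mk p.2).getD "capabilities" [])).contains t then
          some (p.1, (PySem.Dict.mk ((PySem.Dict.mk p.2).getD "capabilities" [])).getD t []) else none)
      = (lvs.filter (fun p => (PySem.Dict.mk (pvCaps p)).contains t)).map
          (fun p => (p.1, (PySem.Dict.mk (pvCaps p)).getD t [])) := by
  induction lvs with
  | nil => rfl
  | cons p rest ih =>
    simp only [pvCaps, PySem.Dict.contains_mk] at ih
    by_cases hp : ((PySem.Dict.mk p.2).getD "capabilities" []).any (fun q => q.1 == t) <;>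
      simp [pvCaps, PySem.Dict.contains_mk, hp, ih]

theorem pv_B_eq (data : List (String × List (String × List (String × List (String × List String))))) :
    generate_capabilities_data_alt data = pvCanon ((PySem.Dict.mk data).getD "levels" []) := by
  simp only [generate_capabilities_data_alt, pvCanon]
  have horder : ((PySem.Dict.mk data).getD "levels" []).foldl
      (fun (seen : PySem.Set String) p => ((PySem.Dict.mk p.2).getD "capabilities" []).foldl (fun seen q => PySem.Set.add seen q.1) seen) []
      = PySem.Set.ofList (((PySem.Dict.mk data).getD "levels" []).flatMap (fun p => (pvCaps p).map (·.1))) := by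
    rw [PySem.List.foldl_congr_mem _ _ (fun seen p => PySem.Set.update seen ((pvCaps p).map (·.1))) _
        (by intro seen p _
            show _ = PySem.Set.update seen ((pvCaps p).map (·.1))
            rw [PySem.Set.update_map_eq_foldl_add]
            rfl)]
    rw [pv_foldl_update]
    rw [PySem.Set.update_nil_left]
  rw [horder]
  refine List.map_congr_left ?_
  intro t _
  rw [pv_B_inner]

-- ===== VERDICT (by name: the statement is the Claim_ definition above) =====
theorem generate_capabilities_data_spec : Claim_equal_generate_capabilities_data := by
  intro data _ hpre
  obtain ⟨-, hnd, hcaps⟩ := hpre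
  show generate_capabilities_data data = generate_capabilities_data_alt data
  rw [pv_A_eq data hnd hcaps, pv_B_eq data]
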